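-- pv_equiv track=rewrite | github.com/avellino/lawfare-litigation | analysis/build_unified_data.py | categorize_status
-- ===== SOURCE A (Python) =====
-- def categorize_status(status):
--     if not status:
--         return "Other"
--     s = status.lower()
--     if any(w in s for w in ["dismissed", "moot", "withdrawn", "terminated", "closed"]):
--         return "Dismissed / Terminated"
--     if any(w in s for w in ["appealed", "appeal filed", "cert", "writ"]):
--         return "On Appeal"
--     if any(w in s for w in ["upheld", "affirmed", "mandate returned", "remanded",
--                              "overturned", "vacated", "rehearing", "en banc"]):
--         return "Appellate Decision"
--     if any(w in s for w in ["stay granted", "stay entered", "stayed", "stay and cert",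
--                              "partial stay", "abeyance", "postpone"]):
--         return "Stayed"
--     if any(w in s for w in ["stay denied", "stay denial", "stay dissolved"]):
--         return "Stay Denied"
--     if any(w in s for w in ["pi granted", "tro granted", "injunction granted",
--                              "pi and class", "pi and partial", "class certified", "enjoined"]):
--         return "Injunction / TRO Granted"
--     if any(w in s for w in ["pi denied", "tro denied", "injunction denied"]):
--         return "Injunction / TRO Denied"
--     if "summary judg" in s:
--         return "Summary Judgment"
--     if any(w in s for w in ["suit filed", "complaint filed", "application filed",
--                              "petition", "indictment"]):
--         return "Pending / Filed"
--     if any(w in s for w in ["consolidated", "venue"]):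
--         return "Procedural"
--     return "Other"
-- ===== SOURCE B (Python) =====
-- KEYWORDS = [
--     ('dismissed', 0, 'Dismissed / Terminated'),
--     ('moot', 0, 'Dismissed / Terminated'),
--     ('withdrawn', 0, 'Dismissed / Terminated'),
--     ('terminated', 0, 'Dismissed / Terminated'),
--     ('closed', 0, 'Dismissed / Terminated'),
--     ('appealed', 1, 'On Appeal'),
--     ('appeal filed', 1, 'On Appeal'),
--     ('cert', 1, 'On Appeal'),
--     ('writ', 1, 'On Appeal'),
--     ('upheld', 2, 'Appellate Decision'),
--     ('affirmed', 2, 'Appellate Decision'),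
--     ('mandate returned', 2, 'Appellate Decision'),
--     ('remanded', 2, 'Appellate Decision'),
--     ('overturned', 2, 'Appellate Decision'),
--     ('vacated', 2, 'Appellate Decision'),
--     ('rehearing', 2, 'Appellate Decision'),
--     ('en banc', 2, 'Appellate Decision'),
--     ('stay granted', 3, 'Stayed'),
--     ('stay entered', 3, 'Stayed'),
--     ('stayed', 3, 'Stayed'),
--     ('stay and cert', 3, 'Stayed'),
--     ('partial stay', 3, 'Stayed'),
--     ('abeyance', 3, 'Stayed'),
--     ('postpone', 3, 'Stayed'),
--     ('stay denied', 4, 'Stay Denied'),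
--     ('stay denial', 4, 'Stay Denied'),
--     ('stay dissolved', 4, 'Stay Denied'),
--     ('pi granted', 5, 'Injunction / TRO Granted'),
--     ('tro granted', 5, 'Injunction / TRO Granted'),
--     ('injunction granted', 5, 'Injunction / TRO Granted'),
--     ('pi and class', 5, 'Injunction / TRO Granted'),
--     ('pi and partial', 5, 'Injunction / TRO Granted'),
--     ('class certified', 5, 'Injunction / TRO Granted'),
--     ('enjoined', 5, 'Injunction / TRO Granted'),
--     ('pi denied', 6, 'Injunction / TRO Denied'),
--     ('tro denied', 6, 'Injunction / TRO Denied'),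
--     ('injunction denied', 6, 'Injunction / TRO Denied'),
--     ('summary judg', 7, 'Summary Judgment'),
--     ('suit filed', 8, 'Pending / Filed'),
--     ('complaint filed', 8, 'Pending / Filed'),
--     ('application filed', 8, 'Pending / Filed'),
--     ('petition', 8, 'Pending / Filed'),
--     ('indictment', 8, 'Pending / Filed'),
--     ('consolidated', 9, 'Procedural'),
--     ('venue', 9, 'Procedural'),
-- ]
--
--
-- def categorize_status(status):
--     if not status:
--         return "Other"
--     s = status.lower()
--     best_pri, best_label = 10, "Other"
--     for word, pri, label in KEYWORDS:
--         if word in s and pri < best_pri: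
--             best_pri, best_label = pri, label
--     return best_label
-- ===== Notes on version B (the rewrite author's own statement) =====
-- stated objective: alternative
-- what changed: Replaces the grouped if-chain with early returns by a single flat pass over a (word, priority, label) table keeping a best-priority accumulator (minimum-priority matched keyword wins), with no early return.
import Mathlib
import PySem

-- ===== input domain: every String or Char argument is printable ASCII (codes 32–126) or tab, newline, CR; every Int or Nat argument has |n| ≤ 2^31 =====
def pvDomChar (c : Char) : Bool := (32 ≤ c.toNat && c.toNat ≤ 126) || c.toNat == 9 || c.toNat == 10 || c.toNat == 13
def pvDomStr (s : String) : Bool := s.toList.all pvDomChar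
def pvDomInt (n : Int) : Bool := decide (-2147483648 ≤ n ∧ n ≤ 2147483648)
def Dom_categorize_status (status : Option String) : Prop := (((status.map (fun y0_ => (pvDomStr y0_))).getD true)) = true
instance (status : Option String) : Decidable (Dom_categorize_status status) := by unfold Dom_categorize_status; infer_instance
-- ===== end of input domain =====

-- B replaces A's grouped if-chain by a single flat pass over a (word, priority, label) table
-- with a best-priority accumulator and no early return (alternative decomposition, same cost).

-- ===== PORT A =====
def categorize_status (status : Option String) : String :=
  match status with
  | none => "Other"
  | some st =>
    if st.toList.isEmpty then "Other" else
    let s := PySem.Str.lower st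
    if (["dismissed", "moot", "withdrawn", "terminated", "closed"].any (fun w => PySem.Str.isIn w s)) then
      "Dismissed / Terminated"
    else if (["appealed", "appeal filed", "cert", "writ"].any (fun w => PySem.Str.isIn w s)) then
      "On Appeal"
    else if (["upheld", "affirmed", "mandate returned", "remanded",
              "overturned", "vacated", "rehearing", "en banc"].any (fun w => PySem.Str.isIn w s)) then
      "Appellate Decision"
    else if (["stay granted", "stay entered", "stayed", "stay and cert",
              "partial stay", "abeyance", "postpone"].any (fun w => PySem.Str.isIn w s)) then
      "Stayed"
    else if (["stay denied", "stay denial", "stay dissolved"].any (fun w => PySem.Str.isIn w s)) then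
      "Stay Denied"
    else if (["pi granted", "tro granted", "injunction granted",
              "pi and class", "pi and partial", "class certified", "enjoined"].any (fun w => PySem.Str.isIn w s)) then
      "Injunction / TRO Granted"
    else if (["pi denied", "tro denied", "injunction denied"].any (fun w => PySem.Str.isIn w s)) then
      "Injunction / TRO Denied"
    else if PySem.Str.isIn "summary judg" s then
      "Summary Judgment"
    else if (["suit filed", "complaint filed", "application filed",
              "petition", "indictment"].any (fun w => PySem.Str.isIn w s)) then
      "Pending / Filed"
    else if (["consolidated", "venue"].any (fun w => PySem.Str.isIn w s)) then
      "Procedural"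
    else "Other"

-- ===== PORT B =====
-- flat table of (word, priority, label) triples, exactly Source B's KEYWORDS
def pvKeywords : List (String × Nat × String) := [
  ("dismissed", 0, "Dismissed / Terminated"),
  ("moot", 0, "Dismissed / Terminated"),
  ("withdrawn", 0, "Dismissed / Terminated"),
  ("terminated", 0, "Dismissed / Terminated"),
  ("closed", 0, "Dismissed / Terminated"),
  ("appealed", 1, "On Appeal"),
  ("appeal filed", 1, "On Appeal"),
  ("cert", 1, "On Appeal"),
  ("writ", 1, "On Appeal"),
  ("upheld", 2, "Appellate Decision"),
  ("affirmed", 2, "Appellate Decision"),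
  ("mandate returned", 2, "Appellate Decision"),
  ("remanded", 2, "Appellate Decision"),
  ("overturned", 2, "Appellate Decision"),
  ("vacated", 2, "Appellate Decision"),
  ("rehearing", 2, "Appellate Decision"),
  ("en banc", 2, "Appellate Decision"),
  ("stay granted", 3, "Stayed"),
  ("stay entered", 3, "Stayed"),
  ("stayed", 3, "Stayed"),
  ("stay and cert", 3, "Stayed"),
  ("partial stay", 3, "Stayed"),
  ("abeyance", 3, "Stayed"),
  ("postpone", 3, "Stayed"),
  ("stay denied", 4, "Stay Denied"),
  ("stay denial", 4, "Stay Denied"),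
  ("stay dissolved", 4, "Stay Denied"),
  ("pi granted", 5, "Injunction / TRO Granted"),
  ("tro granted", 5, "Injunction / TRO Granted"),
  ("injunction granted", 5, "Injunction / TRO Granted"),
  ("pi and class", 5, "Injunction / TRO Granted"),
  ("pi and partial", 5, "Injunction / TRO Granted"),
  ("class certified", 5, "Injunction / TRO Granted"),
  ("enjoined", 5, "Injunction / TRO Granted"),
  ("pi denied", 6, "Injunction / TRO Denied"),
  ("tro denied", 6, "Injunction / TRO Denied"),
  ("injunction denied", 6, "Injunction / TRO Denied"),
  ("summary judg", 7, "Summary Judgment"),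
  ("suit filed", 8, "Pending / Filed"),
  ("complaint filed", 8, "Pending / Filed"),
  ("application filed", 8, "Pending / Filed"),
  ("petition", 8, "Pending / Filed"),
  ("indictment", 8, "Pending / Filed"),
  ("consolidated", 9, "Procedural"),
  ("venue", 9, "Procedural"),
  ]

def categorize_status_alt (status : Option String) : String :=
  match status with
  | none => "Other"
  | some st =>
    if st.toList.isEmpty then "Other" else
    let s := PySem.Str.lower st
    (pvKeywords.foldl
      (fun b t => if PySem.Str.isIn t.1 s && decide (t.2.1 < b.1) then (t.2.1, t.2.2) else b)
      (10, "Other")).2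

-- ===== PRECONDITION & SPEC =====
def Spec_categorize_status (status : Option String) (out : String) : Prop := out = categorize_status_alt status
instance (status : Option String) (out : String) : Decidable (Spec_categorize_status status out) := by unfold Spec_categorize_status; infer_instance

-- ===== CLAIM (what is proved, stated in full; the proofs are below) =====
def Claim_equal_categorize_status : Prop := ∀ (status : Option String), Dom_categorize_status status → Spec_categorize_status status (categorize_status status)

-- ===== LEMMAS AND PROOFS =====

def pvGroup (ws : List String) (pri : Nat) (lab : String) : List (String × Nat × String) :=
  ws.map (fun w => (w, pri, lab))

theorem pvGroup_cons (w : String) (ws : List String) (pri : Nat) (lab : String) :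
    pvGroup (w :: ws) pri lab = (w, pri, lab) :: pvGroup ws pri lab := rfl

def pvFlat (gs : List (List String × Nat × String)) : List (String × Nat × String) :=
  gs.flatMap (fun g => pvGroup g.1 g.2.1 g.2.2)

-- the concrete groups, in branch order with increasing priorities
def pvGroups : List (List String × Nat × String) :=
  [ (["dismissed", "moot", "withdrawn", "terminated", "closed"], 0, "Dismissed / Terminated"),
    (["appealed", "appeal filed", "cert", "writ"], 1, "On Appeal"),
    (["upheld", "affirmed", "mandate returned", "remanded", "overturned", "vacated", "rehearing", "en banc"], 2, "Appellate Decision"),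
    (["stay granted", "stay entered", "stayed", "stay and cert", "partial stay", "abeyance", "postpone"], 3, "Stayed"),
    (["stay denied", "stay denial", "stay dissolved"], 4, "Stay Denied"),
    (["pi granted", "tro granted", "injunction granted", "pi and class", "pi and partial", "class certified", "enjoined"], 5, "Injunction / TRO Granted"),
    (["pi denied", "tro denied", "injunction denied"], 6, "Injunction / TRO Denied"),
    (["summary judg"], 7, "Summary Judgment"),
    (["suit filed", "complaint filed", "application filed", "petition", "indictment"], 8, "Pending / Filed"),
    (["consolidated", "venue"], 9, "Procedural") ]

theorem pvKeywords_eq_flat : pvKeywords = pvFlat pvGroups := by rfl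

-- first-match evaluation of a grouped table, with default d
def pvChainD (s : String) (gs : List (List String × Nat × String)) (d : String) : String :=
  match gs with
  | [] => d
  | (ws, _, lab) :: rest =>
    if ws.any (fun w => PySem.Str.isIn w s) then lab else pvChainD s rest d

theorem pvGroupFold (s : String) (pri : Nat) (lab : String) (ws : List String) (b : Nat × String) :
    List.foldl
      (fun b t => if PySem.Str.isIn t.1 s && decide (t.2.1 < b.1) then (t.2.1, t.2.2) else b)
      b (pvGroup ws pri lab)
    = if ws.any (fun w => PySem.Str.isIn w s) && decide (pri < b.1) then (pri, lab) else b := by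
  induction ws generalizing b with
  | nil => simp [pvGroup]
  | cons w ws ih =>
    rw [pvGroup_cons, List.foldl_cons, List.any_cons]
    cases hw : PySem.Str.isIn w s with
    | false =>
      rw [if_neg (by simp), ih, Bool.false_or]
    | true =>
      by_cases hp : pri < b.1
      · rw [if_pos (by simp [hp]), ih]
        simp [hp]
      · rw [if_neg (by simp [hp]), ih]
        simp [hp]

-- once the accumulator's priority is ≤ every remaining priority, the fold is the identity
theorem pvFoldFrozen (s : String) (gs : List (List String × Nat × String)) (b : Nat × String)
    (h : ∀ g ∈ gs, b.1 ≤ g.2.1) :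
    List.foldl
      (fun b t => if PySem.Str.isIn t.1 s && decide (t.2.1 < b.1) then (t.2.1, t.2.2) else b)
      b (pvFlat gs) = b := by
  induction gs with
  | nil => rfl
  | cons g gs ih =>
    have hb : ¬ g.2.1 < b.1 := not_lt.mpr (h g (List.mem_cons_self))
    rw [pvFlat, List.flatMap_cons, ← pvFlat, List.foldl_append, pvGroupFold]
    rw [if_neg (by simp [hb])]
    exact ih (fun g hg => h g (List.mem_cons_of_mem _ hg))

-- the best-priority fold over a flattened table with increasing priorities is first-match
theorem pvFoldChain (s : String) (gs : List (List String × Nat × String)) (b : Nat × String)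
    (hlt : ∀ g ∈ gs, g.2.1 < b.1)
    (hinc : List.Pairwise (fun g h => g.2.1 < h.2.1) gs) :
    (List.foldl
      (fun b t => if PySem.Str.isIn t.1 s && decide (t.2.1 < b.1) then (t.2.1, t.2.2) else b)
      b (pvFlat gs)).2 = pvChainD s gs b.2 := by
  induction gs generalizing b with
  | nil => rfl
  | cons g gs ih =>
    obtain ⟨ws, pri, lab⟩ := g
    have hg : pri < b.1 := hlt _ (List.mem_cons_self)
    rw [pvFlat, List.flatMap_cons, ← pvFlat, List.foldl_append, pvGroupFold]
    cases ha : ws.any (fun w => PySem.Str.isIn w s) with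
    | true =>
      rw [if_pos (by simp [hg])]
      rw [pvFoldFrozen s gs _ (fun h hh => le_of_lt (List.rel_of_pairwise_cons hinc hh))]
      simp only [pvChainD]
      rw [if_pos ha]
    | false =>
      rw [if_neg (by simp)]
      rw [ih b (fun h hh => hlt h (List.mem_cons_of_mem _ hh)) (List.Pairwise.of_cons hinc)]
      simp only [pvChainD]
      rw [if_neg (by rw [ha]; exact Bool.false_ne_true)]

-- ===== VERDICT (by name: the statement is the Claim_ definition above) =====
set_option maxHeartbeats 1000000 in
theorem categorize_status_spec : Claim_equal_categorize_status := by
  intro status _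
  cases status with
  | none => rfl
  | some st =>
    simp only [Spec_categorize_status, categorize_status, categorize_status_alt]
    by_cases he : st.toList.isEmpty = true
    · rw [if_pos he, if_pos he]
    · rw [if_neg he, if_neg he]
      rw [pvKeywords_eq_flat,
          pvFoldChain (PySem.Str.lower st) pvGroups (10, "Other")
            (by intro g hg; fin_cases hg <;> norm_num)
            (by unfold pvGroups; norm_num)]
      simp [pvGroups, pvChainD]
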